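-- pv_equiv track=rewrite | github.com/hatterton/agym | src/agym/games/breakout/collision.py | collide_seg_seg
-- ===== SOURCE A (Python) =====
-- def make_line(p1, p2):
--     a = p1[1] - p2[1]
--     b = p2[0] - p1[0]
--     c = - a * p1[0] - b * p1[1]
--
--     return [a, b, c]
--
-- def place_in_line(line, point):
--     result = line[0] * point[0] + line[1] * point[1] + line[2]
--
--     return result
--
-- def collide_seg_seg(first, second):
--     first_line = make_line(*first)
--     second_line = make_line(*second)
--
--     first_place_in = [place_in_line(first_line, second[i]) for i in range(2)]
--     second_place_in = [place_in_line(second_line, first[i]) for i in range(2)]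
--
--     result = False
--     if (first_place_in[0] * first_place_in[1] < 0 and
--         second_place_in[0] * second_place_in[1] < 0):
--         result = True
--
--     return result, None
-- ===== SOURCE B (Python) =====
-- def collide_seg_seg(first, second):
--     (p1, p2), (q1, q2) = first, second
--     d1x, d1y = p2[0] - p1[0], p2[1] - p1[1]
--     d2x, d2y = q2[0] - q1[0], q2[1] - q1[1]
--     denom = d1x * d2y - d1y * d2x
--     if denom == 0:
--         return False, None
--     wx, wy = q1[0] - p1[0], q1[1] - p1[1]
--     t_num = wx * d2y - wy * d2x
--     u_num = wx * d1y - wy * d1x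
--     if denom > 0:
--         ok = 0 < t_num < denom and 0 < u_num < denom
--     else:
--         ok = denom < t_num < 0 and denom < u_num < 0
--     return ok, None
-- ===== Notes on version B (the rewrite author's own statement) =====
-- stated objective: alternative
-- what changed: Replaced the per-endpoint orientation-sign products (line equations evaluated at each opposite endpoint) with a parametric solve: direction vectors, determinant denom=cross(d1,d2), and exact cross-multiplied integer comparisons checking that both crossing parameters t and u lie strictly in (0,1).
import Mathlib
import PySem

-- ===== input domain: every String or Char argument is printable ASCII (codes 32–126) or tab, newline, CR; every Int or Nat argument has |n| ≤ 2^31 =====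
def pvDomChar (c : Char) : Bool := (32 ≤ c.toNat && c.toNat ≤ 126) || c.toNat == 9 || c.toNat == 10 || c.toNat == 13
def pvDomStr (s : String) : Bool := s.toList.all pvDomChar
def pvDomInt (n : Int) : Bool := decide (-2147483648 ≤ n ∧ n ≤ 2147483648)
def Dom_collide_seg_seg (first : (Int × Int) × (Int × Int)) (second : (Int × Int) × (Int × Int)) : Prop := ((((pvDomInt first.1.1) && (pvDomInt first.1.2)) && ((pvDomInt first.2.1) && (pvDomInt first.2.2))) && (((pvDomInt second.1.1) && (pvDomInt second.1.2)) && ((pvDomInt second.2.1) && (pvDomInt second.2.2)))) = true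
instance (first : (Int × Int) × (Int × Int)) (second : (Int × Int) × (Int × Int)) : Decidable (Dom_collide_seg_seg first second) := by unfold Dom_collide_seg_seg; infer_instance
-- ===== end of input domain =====

-- B replaces the per-endpoint orientation-sign products with a parametric linear-system solve
-- (cross-multiplied integer comparisons on the crossing parameters t and u); alternative decomposition, same cost.

-- ===== PORT A =====
def make_line (p1 p2 : Int × Int) : Int × Int × Int :=
  let a := p1.2 - p2.2
  let b := p2.1 - p1.1
  let c := - a * p1.1 - b * p1.2
  (a, b, c)

def place_in_line (line : Int × Int × Int) (point : Int × Int) : Int :=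
  line.1 * point.1 + line.2.1 * point.2 + line.2.2

def collide_seg_seg (first : (Int × Int) × (Int × Int)) (second : (Int × Int) × (Int × Int)) : Bool × Option Int :=
  let first_line := make_line first.1 first.2
  let second_line := make_line second.1 second.2
  let first_place_in := [place_in_line first_line second.1, place_in_line first_line second.2]
  let second_place_in := [place_in_line second_line first.1, place_in_line second_line first.2]
  let result :=
    if first_place_in[0]! * first_place_in[1]! < 0 ∧
       second_place_in[0]! * second_place_in[1]! < 0 then true else false
  (result, none)

-- ===== PORT B =====
def segCross (v w : Int × Int) : Int := v.1 * w.2 - v.2 * w.1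

def collide_seg_seg_alt (first : (Int × Int) × (Int × Int)) (second : (Int × Int) × (Int × Int)) : Bool × Option Int :=
  let d1 : Int × Int := (first.2.1 - first.1.1, first.2.2 - first.1.2)
  let d2 : Int × Int := (second.2.1 - second.1.1, second.2.2 - second.1.2)
  let denom := segCross d1 d2
  if denom = 0 then (false, none)
  else
    let w : Int × Int := (second.1.1 - first.1.1, second.1.2 - first.1.2)
    let t_num := segCross w d2
    let u_num := segCross w d1
    let ok :=
      if 0 < denom then
        if 0 < t_num ∧ t_num < denom ∧ 0 < u_num ∧ u_num < denom then true else false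
      else
        if denom < t_num ∧ t_num < 0 ∧ denom < u_num ∧ u_num < 0 then true else false
    (ok, none)

-- ===== PRECONDITION & SPEC =====
def Spec_collide_seg_seg (first : (Int × Int) × (Int × Int)) (second : (Int × Int) × (Int × Int)) (out : Bool × Option Int) : Prop := out = collide_seg_seg_alt first second
instance (first : (Int × Int) × (Int × Int)) (second : (Int × Int) × (Int × Int)) (out : Bool × Option Int) : Decidable (Spec_collide_seg_seg first second out) := by unfold Spec_collide_seg_seg; infer_instance

-- ===== CLAIM (what is proved, stated in full; the proofs are below) =====
def Claim_equal_collide_seg_seg : Prop := ∀ (first : (Int × Int) × (Int × Int)) (second : (Int × Int) × (Int × Int)), Dom_collide_seg_seg first second → Spec_collide_seg_seg first second (collide_seg_seg first second)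

-- ===== LEMMAS AND PROOFS =====

-- ===== VERDICT (by name: the statement is the Claim_ definition above) =====
-- a product x*(x-D) is negative exactly when x lies strictly between 0 and D
lemma between_of_mul_sub_neg (x D : Int) :
    x * (x - D) < 0 ↔ (0 < D ∧ 0 < x ∧ x < D) ∨ (D < 0 ∧ D < x ∧ x < 0) := by
  rw [mul_neg_iff]; omega

lemma collide_core (x1 y1 x2 y2 x3 y3 x4 y4 : Int) :
    collide_seg_seg ((x1, y1), (x2, y2)) ((x3, y3), (x4, y4)) =
    collide_seg_seg_alt ((x1, y1), (x2, y2)) ((x3, y3), (x4, y4)) := by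
  unfold collide_seg_seg collide_seg_seg_alt make_line place_in_line segCross
  simp only [List.getElem!_cons_zero, List.getElem!_cons_succ]
  have hF : ((y1 - y2) * x3 + (x2 - x1) * y3 + (-(y1 - y2) * x1 - (x2 - x1) * y1)) *
      ((y1 - y2) * x4 + (x2 - x1) * y4 + (-(y1 - y2) * x1 - (x2 - x1) * y1)) =
      ((x3 - x1) * (y2 - y1) - (y3 - y1) * (x2 - x1)) *
      (((x3 - x1) * (y2 - y1) - (y3 - y1) * (x2 - x1)) -
        ((x2 - x1) * (y4 - y3) - (y2 - y1) * (x4 - x3))) := by ring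
  have hS : ((y3 - y4) * x1 + (x4 - x3) * y1 + (-(y3 - y4) * x3 - (x4 - x3) * y3)) *
      ((y3 - y4) * x2 + (x4 - x3) * y2 + (-(y3 - y4) * x3 - (x4 - x3) * y3)) =
      ((x3 - x1) * (y4 - y3) - (y3 - y1) * (x4 - x3)) *
      (((x3 - x1) * (y4 - y3) - (y3 - y1) * (x4 - x3)) -
        ((x2 - x1) * (y4 - y3) - (y2 - y1) * (x4 - x3))) := by ring
  rw [hF, hS]
  simp only [between_of_mul_sub_neg]
  split_ifs <;> first | rfl | omega

theorem collide_seg_seg_spec : Claim_equal_collide_seg_seg := by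
  intro first second _
  obtain ⟨⟨x1, y1⟩, x2, y2⟩ := first
  obtain ⟨⟨x3, y3⟩, x4, y4⟩ := second
  exact collide_core x1 y1 x2 y2 x3 y3 x4 y4
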